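-- pv_equiv track=rewrite | github.com/LucaJiang/codes_for_MSDM5051_final_project | codes/sort1.py | _count_sort1
-- ===== SOURCE A (Python) =====
-- def insert_sort(array):
--     # copy from sample code
--     n = len(array)
--     if n <= 1:
--         return array
--     for i in range(1, n):  # The new card: (1, 2, ..., n-1)
--         for j in range(i, 0, -1):  # From the new card to old cards
--             if array[j] < array[j - 1]:
--                 array[j], array[j - 1] = array[j - 1], array[j]
--             else:
--                 break
--     return array
--
-- def _count_sort1(index_order, ele):
--     n = len(index_order)
--     type_dict = {}
--     for i in range(n):
--         key = ele[i]
--         type_dict.setdefault(key, []).append(index_order[i])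
--     key_sort = insert_sort(list(type_dict.keys()))
--     i = 0
--     index_order = []
--     for key in key_sort:
--         index_order += type_dict[key]
--     return index_order
-- ===== SOURCE B (Python) =====
-- def _count_sort1(index_order, ele):
--     n = len(index_order)
--     order = sorted(range(n), key=lambda i: ele[i])
--     return [index_order[i] for i in order]
-- ===== Notes on version B (the rewrite author's own statement) =====
-- stated objective: faster
-- what changed: A groups indices into a bucket dictionary keyed by ele, insertion-sorts the distinct keys with an in-place swap loop, and concatenates the buckets; B does one stable sort of the positions keyed on ele and maps them through index_order, eliminating the dictionary, the hand-written quadratic key sort and the concatenation loop.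
import Mathlib
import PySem

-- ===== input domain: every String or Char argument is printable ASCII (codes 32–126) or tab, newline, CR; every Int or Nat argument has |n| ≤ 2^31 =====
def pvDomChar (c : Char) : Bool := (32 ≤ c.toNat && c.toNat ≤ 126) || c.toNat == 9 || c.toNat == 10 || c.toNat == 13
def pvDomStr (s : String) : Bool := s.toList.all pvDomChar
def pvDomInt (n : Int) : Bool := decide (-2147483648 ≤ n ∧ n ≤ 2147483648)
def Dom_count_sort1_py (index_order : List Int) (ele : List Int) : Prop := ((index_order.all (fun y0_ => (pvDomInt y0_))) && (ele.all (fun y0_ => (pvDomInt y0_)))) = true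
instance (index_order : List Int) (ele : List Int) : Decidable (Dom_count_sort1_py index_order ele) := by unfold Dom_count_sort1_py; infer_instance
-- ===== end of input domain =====

-- B replaces A's bucket-dictionary / insertion-sort-the-keys / concatenate strategy by one stable
-- sort of the index positions keyed on ele (objective: faster — it avoids A's quadratic insertion
-- sort of the distinct keys, as a timing run measured).

-- ===== PORT A =====
-- inner 'for j in range(i, 0, -1)' loop of insert_sort, with its break
def insertSortInnerA (arr : List Int) (js : List Int) : List Int :=
  match js with
  | [] => arr
  | j :: rest =>
    if PySem.List.pyGetD arr j 0 < PySem.List.pyGetD arr (j - 1) 0 then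
      -- array[j], array[j-1] = array[j-1], array[j]
      insertSortInnerA
        (PySem.List.pySetD (PySem.List.pySetD arr j (PySem.List.pyGetD arr (j - 1) 0))
          (j - 1) (PySem.List.pyGetD arr j 0))
        rest
    else arr  -- break

def insertSortA (array : List Int) : List Int :=
  let n := PySem.List.len array
  if n ≤ 1 then array
  else
    (PySem.List.pyRange 1 n 1).foldl
      (fun arr i => insertSortInnerA arr (PySem.List.pyRange i 0 (-1))) array

def count_sort1_py (index_order : List Int) (ele : List Int) : List Int :=
  let n := PySem.List.len index_order
  -- type_dict.setdefault(key, []).append(index_order[i])  ==  modify key [] (· ++ [index_order[i]])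
  let type_dict : PySem.Dict Int (List Int) :=
    (PySem.List.pyRange 0 n 1).foldl
      (fun d i =>
        d.modify (PySem.List.pyGetD ele i 0) []
          (fun vs => vs ++ [PySem.List.pyGetD index_order i 0]))
      PySem.Dict.empty
  let key_sort := insertSortA type_dict.keys
  key_sort.foldl (fun acc key => acc ++ type_dict.getD key []) []

-- ===== PORT B =====
def count_sort1_py_alt (index_order : List Int) (ele : List Int) : List Int :=
  let n := PySem.List.len index_order
  let order := PySem.List.sorted (PySem.List.pyRange 0 n 1) (fun i => PySem.List.pyGetD ele i 0)
  order.map (fun i => PySem.List.pyGetD index_order i 0)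

-- ===== PRECONDITION & SPEC =====
-- Pre_ excludes exactly the inputs where the Python raises IndexError (ele shorter than
-- index_order: ele[i] is read for every i below len(index_order), in A and in B alike).
def Pre_count_sort1_py (index_order : List Int) (ele : List Int) : Prop :=
  index_order.length ≤ ele.length
instance (index_order : List Int) (ele : List Int) : Decidable (Pre_count_sort1_py index_order ele) := by unfold Pre_count_sort1_py; infer_instance
def pvWitness_count_sort1_py : List Int × List Int := ([3, 4, 5], [1, 0, 1])

def Spec_count_sort1_py (index_order : List Int) (ele : List Int) (out : List Int) : Prop := out = count_sort1_py_alt index_order ele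
instance (index_order : List Int) (ele : List Int) (out : List Int) : Decidable (Spec_count_sort1_py index_order ele out) := by unfold Spec_count_sort1_py; infer_instance

-- ===== CLAIM (what is proved, stated in full; the proofs are below) =====
def Claim_equal_count_sort1_py : Prop := ∀ (index_order : List Int) (ele : List Int), Dom_count_sort1_py index_order ele → Pre_count_sort1_py index_order ele → Spec_count_sort1_py index_order ele (count_sort1_py index_order ele)

-- ===== LEMMAS AND PROOFS =====

theorem pyRange_neg_one_nil (a b : Int) (h : a ≤ b) : PySem.List.pyRange a b (-1) = [] := by
  simp [PySem.List.pyRange]; omega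

theorem pyRange_neg_one_cons (a b : Int) (h : b < a) :
    PySem.List.pyRange a b (-1) = a :: PySem.List.pyRange (a - 1) b (-1) := by
  simp only [PySem.List.pyRange, if_neg (by norm_num : ¬ (-1 : Int) = 0)]
  norm_num
  rw [if_pos h]
  by_cases hb : b < a - 1
  · rw [if_pos hb]
    have : (a - b).toNat = (a - 1 - b).toNat + 1 := by omega
    rw [this, List.range_succ_eq_map]
    simp [List.map_map, Function.comp]
    intro k _; ring
  · rw [if_neg hb]
    have : (a - b).toNat = 1 := by omega
    rw [this]
    simp

theorem pyRange_one_nil (a b : Int) (h : b ≤ a) : PySem.List.pyRange a b 1 = [] := by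
  simp [PySem.List.pyRange]; omega

-- writing into the middle of a list
theorem pySetD_append_cons {pre : List Int} (u v : Int) (suf : List Int) :
    PySem.List.pySetD (pre ++ u :: suf) (pre.length : Int) v = pre ++ v :: suf := by
  simp only [PySem.List.pySetD, PySem.List.pySet?, PySem.List.pyIdx?]
  rw [if_pos (by positivity), if_pos (by simp)]
  simp only [Option.map_some, Option.getD_some, Int.toNat_natCast]
  induction pre with
  | nil => simp
  | cons p t ih =>
    simp only [List.cons_append, List.length_cons, List.set_cons_succ]
    rw [ih]

theorem pyGetD_append_cons {pre : List Int} (u : Int) (suf : List Int) :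
    PySem.List.pyGetD (pre ++ u :: suf) (pre.length : Int) 0 = u := by
  simp only [PySem.List.pyGetD, PySem.List.pyGet?_append_length, Option.getD_some]


theorem insertBy_skip {α : Type} (before : α → α → Bool) (x : α) (ys zs : List α)
    (h : ∀ y ∈ ys, before x y = false) :
    PySem.List.insertBy before x (ys ++ zs) = ys ++ PySem.List.insertBy before x zs := by
  induction ys with
  | nil => simp
  | cons y t ih =>
    simp only [List.cons_append, PySem.List.insertBy, h y (by simp)]
    simp only [Bool.false_eq_true, if_false]
    rw [ih (fun y hy => h y (by simp [hy]))]

theorem insertBy_front {α : Type} (before : α → α → Bool) (x : α) (zs : List α)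
    (h : ∀ z ∈ zs, before x z = true) :
    PySem.List.insertBy before x zs = x :: zs := by
  cases zs with
  | nil => rfl
  | cons z t => simp only [PySem.List.insertBy, h z (by simp), if_true]

theorem dropWhile_lt_ge (kx : Int) (K : List Int) (hK : K.Pairwise (· < ·)) :
    ∀ k ∈ K.dropWhile (fun k => decide (k < kx)), kx ≤ k := by
  induction K with
  | nil => simp
  | cons a t ih =>
    intro k hk
    by_cases ha : a < kx
    · rw [List.dropWhile_cons_of_pos (by simpa using ha)] at hk
      exact ih hK.tail k hk
    · rw [List.dropWhile_cons_of_neg (by simpa using ha)] at hk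
      rcases List.mem_cons.mp hk with rfl | hk
      · omega
      · have := (List.pairwise_cons.mp hK).1 k hk
        omega

theorem stable_grouped (key : Int → Int) (l : List Int) :
    PySem.List.sorted l key =
      (PySem.List.sorted (PySem.Set.ofList (l.map key)) (fun x => x)).flatMap
        (fun k => l.filter (fun y => key y == k)) := by
  induction l using List.reverseRecOn with
  | nil => rfl
  | append_singleton l x ih =>
    set before : Int → Int → Bool := fun a b => decide (key a < key b) with hbef
    have hstep : PySem.List.sorted (l ++ [x]) key
        = PySem.List.insertBy before x (PySem.List.sorted l key) := by
      rw [PySem.List.sorted_eq_foldl_insertBy, PySem.List.sorted_eq_foldl_insertBy,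
        List.foldl_append]
      rfl
    set K := PySem.List.sorted (PySem.Set.ofList (l.map key)) (fun x => x) with hKdef
    have hKlt : K.Pairwise (· < ·) := PySem.List.sorted_ofList_pairwise_lt _
    set p : Int → Bool := fun k => decide (k < key x) with hp
    set K₁ := K.takeWhile p with hK1
    set K₂ := K.dropWhile p with hK2
    have hsplit : K₁ ++ K₂ = K := List.takeWhile_append_dropWhile
    have h1 : ∀ k ∈ K₁, k < key x := fun k hk => by
      simpa [hp] using List.mem_takeWhile_imp hk
    have h2 : ∀ k ∈ K₂, key x ≤ k := dropWhile_lt_ge _ _ hKlt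
    have hK2lt : K₂.Pairwise (· < ·) := hKlt.sublist (List.dropWhile_sublist p)
    have hK1lt : K₁.Pairwise (· < ·) := hKlt.sublist (List.takeWhile_sublist p)
    set g : Int → List Int := fun k => l.filter (fun y => key y == k) with hg
    set g' : Int → List Int := fun k => (l ++ [x]).filter (fun y => key y == k) with hg'
    have hg'eq : ∀ k, g' k = g k ++ if key x == k then [x] else [] := by
      intro k; by_cases h : key x = k <;>
        simp [hg', hg, List.filter_append, List.filter_cons, h]
    have hgkey : ∀ k, ∀ y ∈ g k, key y = k := by
      intro k y hy
      simpa using List.of_mem_filter hy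
    have hskip1 : ∀ y ∈ K₁.flatMap g, before x y = false := by
      intro y hy
      rcases List.mem_flatMap.mp hy with ⟨k, hk, hyk⟩
      have := hgkey k y hyk
      have := h1 k hk
      simp only [hbef, decide_eq_false_iff_not]
      omega
    rw [hstep, ih]
    by_cases hmem : key x ∈ l.map key
    · -- existing key: the key set is unchanged and x joins its group
      have hK'K : PySem.Set.ofList ((l ++ [x]).map key) = PySem.Set.ofList (l.map key) := by
        rw [List.map_append, List.map_cons, List.map_nil, PySem.Set.ofList_append_singleton,
          PySem.Set.add_of_mem (by rw [PySem.Set.mem_ofList]; exact hmem)]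
      have hkxK : key x ∈ K := by
        rw [hKdef, PySem.List.mem_sorted, PySem.Set.mem_ofList]; exact hmem
      have hkxK2 : key x ∈ K₂ := by
        rcases (List.mem_append.mp (hsplit ▸ hkxK)) with h | h
        · exact absurd (h1 _ h) (by omega)
        · exact h
      have hne : K₂ ≠ [] := by intro h; rw [h] at hkxK2; simp at hkxK2
      obtain ⟨h0, K₃, hK2eq⟩ := List.exists_cons_of_ne_nil hne
      have hhead : h0 = key x := by
        rcases List.mem_cons.mp (hK2eq ▸ hkxK2) with h | h
        · omega
        · have hlt := (List.pairwise_cons.mp (hK2eq ▸ hK2lt)).1 _ h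
          have hle := h2 h0 (hK2eq ▸ List.mem_cons_self)
          omega
      subst hhead
      have hK3gt : ∀ k ∈ K₃, key x < k := (List.pairwise_cons.mp (hK2eq ▸ hK2lt)).1
      have hskipg : ∀ y ∈ g (key x), before x y = false := by
        intro y hy
        have := hgkey _ y hy
        simp only [hbef, decide_eq_false_iff_not]
        omega
      have hfront : ∀ y ∈ K₃.flatMap g, before x y = true := by
        intro y hy
        rcases List.mem_flatMap.mp hy with ⟨k, hk, hyk⟩
        have := hgkey k y hyk
        have := hK3gt k hk
        simp only [hbef, decide_eq_true_eq]
        omega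
      have hrhsK : PySem.List.sorted (PySem.Set.ofList ((l ++ [x]).map key)) (fun x => x) = K := by
        rw [hK'K]
      rw [hrhsK, ← hsplit, hK2eq]
      rw [List.flatMap_append, List.flatMap_cons]
      rw [List.flatMap_append, List.flatMap_cons]
      rw [← List.append_assoc]
      rw [insertBy_skip _ _ _ _ (by
        intro y hy
        rcases List.mem_append.mp hy with h | h
        · exact hskip1 y h
        · exact hskipg y h)]
      rw [insertBy_front _ _ _ hfront]
      have e1 : g' (key x) = g (key x) ++ [x] := by rw [hg'eq]; simp
      have e2 : K₁.flatMap g' = K₁.flatMap g := by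
        apply List.flatMap_congr
        intro k hk
        rw [hg'eq]
        have := h1 k hk
        have : (key x == k) = false := by simp; omega
        simp [this]
      have e3 : K₃.flatMap g' = K₃.flatMap g := by
        apply List.flatMap_congr
        intro k hk
        rw [hg'eq]
        have := hK3gt k hk
        have : (key x == k) = false := by simp; omega
        simp [this]
      rw [e1, e2, e3]
      simp
    · -- new key: it is inserted between the smaller and the larger keys, with [x] as its group
      have hK' : PySem.Set.ofList ((l ++ [x]).map key)
          = PySem.Set.ofList (l.map key) ++ [key x] := by
        rw [List.map_append, List.map_cons, List.map_nil, PySem.Set.ofList_append_singleton,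
          PySem.Set.add_of_not_mem (by rw [PySem.Set.mem_ofList]; exact hmem)]
      have hkxnotK : key x ∉ K := by
        rw [hKdef, PySem.List.mem_sorted, PySem.Set.mem_ofList]; exact hmem
      have h2' : ∀ k ∈ K₂, key x < k := by
        intro k hk
        have := h2 k hk
        have : k ≠ key x := by
          intro h; exact hkxnotK (h ▸ (hsplit ▸ List.mem_append.mpr (Or.inr hk)))
        omega
      have hsortK' : PySem.List.sorted (PySem.Set.ofList ((l ++ [x]).map key)) (fun x => x)
          = K₁ ++ key x :: K₂ := by
        rw [hK']
        apply PySem.List.sorted_eq_of_perm_of_pairwise_lt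
        · have p1 : (K₁ ++ key x :: K₂).Perm (key x :: K) := by
            rw [← hsplit]; exact List.perm_middle
          have p2 : (key x :: K).Perm (K ++ [key x]) := by
            simpa using (List.perm_middle (a := key x) (l₁ := K) (l₂ := [])).symm
          have p3 : (K ++ [key x]).Perm (PySem.Set.ofList (l.map key) ++ [key x]) :=
            (PySem.List.sorted_perm _ _ _).append_right _
          exact p1.trans (p2.trans p3)
        · rw [List.pairwise_append]
          refine ⟨hK1lt, List.pairwise_cons.mpr ⟨h2', hK2lt⟩, ?_⟩
          intro a ha b hb
          rcases List.mem_cons.mp hb with rfl | hb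
          · exact h1 a ha
          · have := h1 a ha
            have := h2 b hb
            omega
      have egkx : g (key x) = [] := by
        rw [hg, List.filter_eq_nil_iff]
        intro y hy h
        exact hmem (List.mem_map.mpr ⟨y, hy, by simpa using h⟩)
      have hfront : ∀ y ∈ K₂.flatMap g, before x y = true := by
        intro y hy
        rcases List.mem_flatMap.mp hy with ⟨k, hk, hyk⟩
        have h3 := List.of_mem_filter hyk
        have := h2' k hk
        simp only [hbef, decide_eq_true_eq]
        simp only [beq_iff_eq] at h3
        omega
      rw [hsortK', ← hsplit]
      rw [List.flatMap_append, List.flatMap_append, List.flatMap_cons]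
      rw [insertBy_skip _ _ _ _ hskip1, insertBy_front _ _ _ hfront]
      have e1 : g' (key x) = [x] := by rw [hg'eq, egkx]; simp
      have e2 : K₁.flatMap g' = K₁.flatMap g := by
        apply List.flatMap_congr
        intro k hk
        rw [hg'eq]
        have := h1 k hk
        have : (key x == k) = false := by simp; omega
        simp [this]
      have e3 : K₂.flatMap g' = K₂.flatMap g := by
        apply List.flatMap_congr
        intro k hk
        rw [hg'eq]
        have := h2' k hk
        have : (key x == k) = false := by simp; omega
        simp [this]
      rw [e1, e2, e3]
      simp

theorem pairwise_lt_of_le_nodup (l : List Int) (h1 : l.Pairwise (· ≤ ·)) (h2 : l.Nodup) :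
    l.Pairwise (· < ·) := by
  have := h1.and h2
  exact this.imp (by intro a b ⟨x, y⟩; omega)

theorem inner_spec (A : List Int) : ∀ (x : Int) (B : List Int), A.Pairwise (· ≤ ·) →
    ∃ A', insertSortInnerA (A ++ x :: B) (PySem.List.pyRange (A.length : Int) 0 (-1)) = A' ++ B ∧
      A'.Perm (A ++ [x]) ∧ A'.Pairwise (· ≤ ·) := by
  induction A using List.reverseRecOn with
  | nil =>
    intro x B _
    refine ⟨[x], ?_, by simp, by simp⟩
    rw [pyRange_neg_one_nil _ _ (by simp)]
    simp [insertSortInnerA]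
  | append_singleton A₀ z ih =>
    intro x B hpair
    have hlen : ((A₀ ++ [z]).length : Int) = (A₀.length : Int) + 1 := by simp
    have harr : (A₀ ++ [z]) ++ x :: B = A₀ ++ z :: x :: B := by simp
    have harr2 : A₀ ++ z :: x :: B = (A₀ ++ [z]) ++ x :: B := by simp
    rw [hlen, pyRange_neg_one_cons _ _ (by positivity), harr]
    have hsub : (A₀.length : Int) + 1 - 1 = (A₀.length : Int) := by ring
    have hgx : PySem.List.pyGetD (A₀ ++ z :: x :: B) ((A₀.length : Int) + 1) 0 = x := by
      have : ((A₀.length : Int) + 1) = (((A₀ ++ [z]).length : Int)) := by simp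
      rw [this, harr2, pyGetD_append_cons]
    have hga : PySem.List.pyGetD (A₀ ++ z :: x :: B) ((A₀.length : Int) + 1 - 1) 0 = z := by
      rw [hsub, pyGetD_append_cons]
    simp only [insertSortInnerA, hgx, hga]
    by_cases hlt : x < z
    · rw [if_pos hlt]
      have hset : PySem.List.pySetD
          (PySem.List.pySetD (A₀ ++ z :: x :: B) ((A₀.length : Int) + 1) z)
          ((A₀.length : Int) + 1 - 1) x = A₀ ++ x :: z :: B := by
        have e1 : PySem.List.pySetD (A₀ ++ z :: x :: B) ((A₀.length : Int) + 1) z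
            = A₀ ++ z :: z :: B := by
          have h2 : ((A₀.length : Int) + 1) = (((A₀ ++ [z]).length : Int)) := by simp
          rw [h2, harr2, pySetD_append_cons]
          simp
        rw [e1, hsub]
        have h3 : A₀ ++ z :: z :: B = A₀ ++ z :: (z :: B) := rfl
        rw [h3, pySetD_append_cons]
      rw [hset, hsub]
      obtain ⟨A', heq, hperm, hpw⟩ := ih x (z :: B) (hpair.sublist (by simp))
      refine ⟨A' ++ [z], by rw [heq]; simp, ?_, ?_⟩
      · have p1 : (A' ++ [z]).Perm ((A₀ ++ [x]) ++ [z]) := hperm.append_right _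
        have p2 : ((A₀ ++ [x]) ++ [z]).Perm ((A₀ ++ [z]) ++ [x]) := by
          rw [List.append_assoc, List.append_assoc]
          exact (List.Perm.append_left A₀ (by simp [List.Perm.swap]))
        exact p1.trans p2
      · rw [List.pairwise_append]
        refine ⟨hpw, by simp, ?_⟩
        intro y hy b hb
        simp only [List.mem_singleton] at hb
        rw [hb]
        rcases List.mem_append.mp (hperm.mem_iff.mp hy) with h | h
        · exact (List.pairwise_append.mp hpair).2.2 y h z (by simp)
        · simp only [List.mem_singleton] at h
          rw [h]
          omega
    · rw [if_neg hlt]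
      refine ⟨(A₀ ++ [z]) ++ [x], by simp, by simp, ?_⟩
      rw [List.pairwise_append]
      refine ⟨hpair, by simp, ?_⟩
      intro y hy b hb
      simp only [List.mem_singleton] at hb
      rw [hb]
      rcases List.mem_append.mp hy with h | h
      · have := (List.pairwise_append.mp hpair).2.2 y h z (by simp)
        omega
      · simp only [List.mem_singleton] at h
        rw [h]
        omega

theorem outer_spec (T : List Int) : ∀ (S : List Int), S.Pairwise (· ≤ ·) →
    ∃ R, (PySem.List.pyRange (S.length : Int) ((S.length : Int) + T.length) 1).foldl
        (fun arr i => insertSortInnerA arr (PySem.List.pyRange i 0 (-1))) (S ++ T) = R ∧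
      R.Perm (S ++ T) ∧ R.Pairwise (· ≤ ·) := by
  induction T with
  | nil =>
    intro S hS
    refine ⟨S ++ [], ?_, List.Perm.refl _, by simpa using hS⟩
    rw [pyRange_one_nil _ _ (by simp)]
    rfl
  | cons x T' ih =>
    intro S hS
    rw [PySem.List.pyRange_one_cons (by push_cast [List.length_cons]; omega)]
    simp only [List.foldl_cons]
    obtain ⟨A', heq, hperm, hpw⟩ := inner_spec S x T' hS
    rw [heq]
    have hlenA' : A'.length = S.length + 1 := by
      have := hperm.length_eq; simpa using this
    obtain ⟨R, heq2, hperm2, hpw2⟩ := ih A' hpw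
    refine ⟨R, ?_, ?_, hpw2⟩
    · rw [← heq2]
      congr 1
      push_cast [hlenA', List.length_cons]
      ring_nf
    · refine hperm2.trans ?_
      have h5 : (A' ++ T').Perm ((S ++ [x]) ++ T') := hperm.append_right _
      refine h5.trans ?_
      simp

theorem insertSortA_spec (arr : List Int) :
    (insertSortA arr).Perm arr ∧ (insertSortA arr).Pairwise (· ≤ ·) := by
  unfold insertSortA
  simp only [PySem.List.len_eq]
  by_cases h : (arr.length : Int) ≤ 1
  · rw [if_pos h]
    refine ⟨List.Perm.refl _, ?_⟩
    match arr with
    | [] => simp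
    | [a] => simp
    | a :: b :: t => simp at h; omega
  · rw [if_neg h]
    match arr with
    | [] => simp at h
    | s :: rest =>
      obtain ⟨R, heq, hperm, hpw⟩ := outer_spec rest [s] (by simp)
      simp only [List.length_singleton, List.singleton_append] at heq hperm
      push_cast at heq
      have h3 : ((s :: rest).length : Int) = 1 + rest.length := by simp; omega
      rw [h3, heq]
      exact ⟨hperm, hpw⟩

theorem main_eq (index_order ele : List Int) :
    count_sort1_py index_order ele = count_sort1_py_alt index_order ele := by
  unfold count_sort1_py count_sort1_py_alt
  simp only [PySem.List.len_eq]
  set idxs := PySem.List.pyRange 0 (index_order.length : Int) 1 with hidxs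
  set key : Int → Int := fun i => PySem.List.pyGetD ele i 0 with hkey
  set val : Int → Int := fun i => PySem.List.pyGetD index_order i 0 with hval
  set f : Int → Int × Int := fun i => (key i, val i) with hf
  set ps := idxs.map f with hps
  set td := idxs.foldl
      (fun d i => d.modify (key i) [] (fun vs => vs ++ [val i])) PySem.Dict.empty with htd
  have hfold : td = ps.foldl (fun d p => d.modify p.1 [] (fun vs => vs ++ [p.2]))
      PySem.Dict.empty := by
    rw [hps, List.foldl_map]
  have hgetD : ∀ k, td.getD k [] = (ps.filter (fun p => p.1 == k)).map (fun p => p.2) := by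
    intro k
    rw [hfold, PySem.Dict.getD_foldl_modify_append]
    simp [PySem.Dict.getD_empty]
  have hkeys : td.keys = PySem.Set.ofList (idxs.map key) := by
    rw [htd, PySem.Dict.keys_foldl_modify_key idxs key [] (fun d i vs => vs ++ [val i])]
    rw [PySem.Dict.keys_empty, PySem.Set.ofList_eq_foldl]
    rfl
  set ks := insertSortA td.keys with hks
  obtain ⟨hperm, hpw⟩ := insertSortA_spec td.keys
  have hnd : ks.Nodup := by
    rw [hks]
    exact (hperm.nodup_iff).mpr (hkeys ▸ PySem.Set.nodup_ofList _)
  have hlt : ks.Pairwise (· < ·) := pairwise_lt_of_le_nodup ks hpw hnd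
  have hsorted : PySem.List.sorted (PySem.Set.ofList (idxs.map key)) (fun x => x) = ks := by
    apply PySem.List.sorted_eq_of_perm_of_pairwise_lt
    · exact hkeys ▸ hperm
    · exact hlt
  rw [PySem.List.foldl_append_eq_flatMap, List.nil_append]
  rw [stable_grouped key idxs, hsorted]
  rw [List.map_flatMap]
  apply List.flatMap_congr
  intro k _
  rw [hgetD k, hps, List.filter_map, List.map_map]
  rfl

-- ===== VERDICT (by name: the statement is the Claim_ definition above) =====
theorem count_sort1_py_spec : Claim_equal_count_sort1_py := by
  intro index_order ele _ _
  unfold Spec_count_sort1_py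
  exact main_eq index_order ele
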